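-- pv_equiv track=rewrite | github.com/khanh585/server-barcode | utils/bot_drawer.py | findDrawer
-- ===== SOURCE A (Python) =====
-- def isDrawer(st):
--     head = st[:2]
--     tail = st[2:]
--     if head == 'KS' and tail.isdecimal():
--         return True
--     return False
--
-- def findDrawer(data):
--     temp = []
--     left = []
--     right = []
--     drawer_index = None
--     drawer_name = ''
--
--     # check index start drawer and end drawer
--     for i in range(len(data)):
--         tmp = data[i]
--
--         if isDrawer(tmp):
--             drawer_index = i
--             drawer_name = tmp
--
--     if drawer_index != None:
--         left = data[:drawer_index]
--         right = data[drawer_index+1:]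
--     else:
--         temp = data
--
--
--     return drawer_name, left, right, temp
-- ===== SOURCE B (Python) =====
-- def findDrawer(data):
--     # Build the three parts directly in one pass: no indices, no slicing.
--     # Each element goes into left until a drawer is seen; after that, into right.
--     # A later drawer flushes the previous drawer and right into left.
--     found = False
--     name = ''
--     left = []
--     right = []
--     for s in data:
--         if s[:2] == 'KS' and s[2:].isdecimal():
--             if found:
--                 left.append(name)
--                 left.extend(right)
--                 right = []
--             name = s
--             found = True
--         elif found:
--             right.append(s)
--         else:
--             left.append(s)
--     if found:
--         return name, left, right, []
--     return '', [], [], data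
-- ===== Notes on version B (the rewrite author's own statement) =====
-- stated objective: alternative
-- what changed: A records the last drawer's index in a full scan and then slices the list around that index; B never computes an index or slice: it builds left/right incrementally in one pass, routing each element into left before a drawer is seen and into right after, flushing name+right into left when a later drawer appears.
import Mathlib
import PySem

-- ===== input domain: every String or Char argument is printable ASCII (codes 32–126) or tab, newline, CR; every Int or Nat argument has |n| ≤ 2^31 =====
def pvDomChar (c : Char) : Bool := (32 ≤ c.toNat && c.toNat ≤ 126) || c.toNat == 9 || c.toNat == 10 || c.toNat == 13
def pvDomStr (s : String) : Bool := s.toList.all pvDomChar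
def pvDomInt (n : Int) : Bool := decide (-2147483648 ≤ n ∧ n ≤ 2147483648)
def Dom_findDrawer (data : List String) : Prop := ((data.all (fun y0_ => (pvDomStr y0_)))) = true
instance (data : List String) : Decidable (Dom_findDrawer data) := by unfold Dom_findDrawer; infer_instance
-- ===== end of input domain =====

-- B replaces A's index-tracking scan + slicing by an index-free single pass that
-- builds left/right directly (objective: alternative decomposition, same cost).
-- Python's str.isdecimal is ported as strIsdigit: exact on the printable-ASCII domain Dom_findDrawer.

-- ===== PORT A =====
def isDrawer (st : String) : Bool :=
  let head := PySem.Str.slice st none (some 2)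
  let tail := PySem.Str.slice st (some 2) none
  if head == "KS" && PySem.Str.strIsdigit tail then true else false

-- loop body of A's 'for i in range(len(data)):' scan
def stepA (st : Option Int × String) (p : Int × String) : Option Int × String :=
  if isDrawer p.2 then (some p.1, p.2) else st

def findDrawer (data : List String) : String × List String × List String × List String :=
  let r := (PySem.List.enumerate data).foldl stepA (none, "")
  match r with
  | (some i, nm) =>
      (nm, PySem.List.slice data none (some i), PySem.List.slice data (some (i + 1)) none, ([] : List String))
  | (none, nm) => (nm, [], [], data)

-- ===== PORT B =====
def isDrawerB (s : String) : Bool :=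
  PySem.Str.slice s none (some 2) == "KS" && PySem.Str.strIsdigit (PySem.Str.slice s (some 2) none)

-- loop body of B's 'for s in data:' pass over (found, name, left, right)
def stepB (st : Bool × String × List String × List String) (s : String) :
    Bool × String × List String × List String :=
  match st with
  | (found, name, left, right) =>
    if isDrawerB s then
      if found then (true, s, (left ++ [name]) ++ right, ([] : List String))
      else (true, s, left, right)
    else if found then (found, name, left, right ++ [s])
    else (found, name, left ++ [s], right)

def findDrawer_alt (data : List String) : String × List String × List String × List String :=
  match data.foldl stepB (false, "", [], []) with
  | (found, name, left, right) =>
      if found then (name, left, right, ([] : List String)) else ("", [], [], data)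

-- ===== PRECONDITION & SPEC =====
def Spec_findDrawer (data : List String) (out : String × List String × List String × List String) : Prop := out = findDrawer_alt data
instance (data : List String) (out : String × List String × List String × List String) : Decidable (Spec_findDrawer data out) := by unfold Spec_findDrawer; infer_instance

-- ===== CLAIM (what is proved, stated in full; the proofs are below) =====
def Claim_equal_findDrawer : Prop := ∀ (data : List String), Dom_findDrawer data → Spec_findDrawer data (findDrawer data)

-- ===== LEMMAS AND PROOFS =====

-- The two drawer tests agree on every string.
theorem isDrawer_eq (s : String) : isDrawer s = isDrawerB s := by
  simp only [isDrawer, isDrawerB]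
  cases h : (PySem.Str.slice s none (some 2) == "KS") <;> simp_all

theorem enumerate_append (ys : List String) (x : String) (s : Int) :
    PySem.List.enumerate (ys ++ [x]) s
      = PySem.List.enumerate ys s ++ [(s + ys.length, x)] := by
  induction ys generalizing s with
  | nil => simp [PySem.List.enumerate_nil, PySem.List.enumerate_cons]
  | cons y ys ih =>
      simp only [List.cons_append, PySem.List.enumerate_cons, ih, List.length_cons]
      have h : s + 1 + (ys.length : Int) = s + ((ys.length + 1 : ℕ) : Int) := by push_cast; ring
      rw [h]

-- Invariant linking A's (last-index, name) fold with B's (found, name, left, right) fold.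
theorem inv_fold (ys : List String) :
    ((PySem.List.enumerate ys).foldl stepA (none, "") = (none, "")
        ∧ ys.foldl stepB (false, "", [], []) = (false, "", ys, []))
    ∨ (∃ (iN : ℕ) (nm : String), iN < ys.length
        ∧ (PySem.List.enumerate ys).foldl stepA (none, "") = (some (iN : Int), nm)
        ∧ ys.take iN ++ nm :: ys.drop (iN + 1) = ys
        ∧ ys.foldl stepB (false, "", [], []) = (true, nm, ys.take iN, ys.drop (iN + 1))) := by
  induction ys using List.reverseRecOn with
  | nil => left; exact ⟨rfl, rfl⟩
  | append_singleton ys x ih =>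
      rw [enumerate_append, List.foldl_append, List.foldl_append]
      simp only [List.foldl_cons, List.foldl_nil]
      by_cases hx : isDrawer x
      · -- x is a drawer: it becomes the new last match, at index ys.length
        right
        refine ⟨ys.length, x, by simp, ?_, ?_, ?_⟩
        · rcases ih with ⟨ha, _⟩ | ⟨iN, nm, _, ha, _, _⟩ <;>
            simp [stepA, hx]
        · simp
        · have htake : (ys ++ [x]).take ys.length = ys := by simp
          have hdrop : (ys ++ [x]).drop (ys.length + 1) = [] := by
            rw [List.drop_eq_nil_iff]; simp
          rcases ih with ⟨_, hb⟩ | ⟨iN, nm, hi, _, hsand, hb⟩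
          · simp [hb, stepB, ← isDrawer_eq, hx, htake, hdrop]
          · have hflush : ((ys.take iN ++ [nm]) ++ ys.drop (iN + 1)) = ys := by
              simpa using hsand
            simp [hb, stepB, ← isDrawer_eq, hx, hflush, htake, hdrop]
      · -- x is not a drawer: A's state is unchanged; x goes to B's left (not found) or right (found)
        rcases ih with ⟨ha, hb⟩ | ⟨iN, nm, hi, ha, hsand, hb⟩
        · left
          constructor
          · simp [ha, stepA, hx]
          · simp [hb, stepB, ← isDrawer_eq, hx]
        · right
          refine ⟨iN, nm, by simp; omega, by simp [ha, stepA, hx], ?_, ?_⟩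
          · rw [List.take_append_of_le_length (by omega),
                List.drop_append_of_le_length (by omega)]
            conv_rhs => rw [← hsand]
            simp
          · rw [hb, List.take_append_of_le_length (by omega),
                List.drop_append_of_le_length (by omega)]
            simp [stepB, ← isDrawer_eq, hx]

-- ===== VERDICT (by name: the statement is the Claim_ definition above) =====
theorem findDrawer_spec : Claim_equal_findDrawer := by
  intro data _
  show findDrawer data = findDrawer_alt data
  unfold findDrawer findDrawer_alt
  rcases inv_fold data with ⟨ha, hb⟩ | ⟨iN, nm, hi, ha, _, hb⟩
  · rw [ha, hb]
    rfl
  · rw [ha, hb]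
    have h1 : PySem.List.slice data none (some (iN : Int)) = data.take iN := by
      simp
    have h2 : PySem.List.slice data (some ((iN : Int) + 1)) none = data.drop (iN + 1) := by
      have := PySem.List.slice_from_natCast data (iN + 1)
      push_cast at this
      simpa using this
    simp [h1, h2]
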